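-- pv_equiv track=rewrite | github.com/simalaybuke09/kriptoloji | methods/columnar_cipher.py | _get_key_order
-- ===== SOURCE A (Python) =====
-- def _get_key_order(key):
--     sorted_chars = sorted(list(key.upper()))
--     order = []
--     key_list = list(key.upper())
--     for char in sorted_chars:
--         idx = key_list.index(char)
--         order.append(idx)
--         key_list[idx] = None
--     return order
-- ===== SOURCE B (Python) =====
-- def _get_key_order(key):
--     k = key.upper()
--     pos = {}
--     for i, ch in enumerate(k):
--         pos.setdefault(ch, []).append(i)
--     order = []
--     for ch in sorted(pos):
--         order.extend(pos[ch])
--     return order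
-- ===== Notes on version B (the rewrite author's own statement) =====
-- stated objective: faster
-- what changed: Replaces sort-all-chars plus a repeated list.index scan with marking (quadratic) by a single grouping pass that buckets each character's indices in a dict, then concatenates the buckets over the sorted distinct characters.
import Mathlib
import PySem

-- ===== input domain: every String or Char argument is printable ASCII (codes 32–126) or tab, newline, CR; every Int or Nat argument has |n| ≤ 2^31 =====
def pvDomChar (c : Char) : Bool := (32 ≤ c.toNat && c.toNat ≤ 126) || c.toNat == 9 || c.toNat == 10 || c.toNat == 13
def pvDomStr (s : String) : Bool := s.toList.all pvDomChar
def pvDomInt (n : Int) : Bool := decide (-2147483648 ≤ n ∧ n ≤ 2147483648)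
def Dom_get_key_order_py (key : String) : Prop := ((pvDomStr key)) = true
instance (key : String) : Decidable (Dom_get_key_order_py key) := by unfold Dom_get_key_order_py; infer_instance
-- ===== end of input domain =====

-- B replaces A's sort of all characters plus a repeated list.index scan with marking
-- by one grouping pass into a dict of index buckets, concatenated over the sorted distinct characters.

-- ===== PORT A =====
-- one iteration of A's loop body: find the first unconsumed occurrence, record its index, mark it None
def stepA (st : List Int × List (Option Char)) (c : Char) : List Int × List (Option Char) :=
  match PySem.List.index? st.2 (some c) with
  | some idx => (st.1 ++ [(idx : Int)], st.2.set idx none)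
  | none => st  -- unreachable: every char of sorted_chars is still present in key_list

def get_key_order_py (key : String) : List Int :=
  let sorted_chars := PySem.List.sorted (PySem.Chars.upper key.toList) (fun c => c) false
  let key_list : List (Option Char) := (PySem.Chars.upper key.toList).map some
  (sorted_chars.foldl stepA ([], key_list)).1

-- ===== PORT B =====
-- pos.setdefault(ch, []).append(i) is PySem.Dict.modify ch [] (· ++ [i]) (insert-or-append, key position kept)
def get_key_order_py_alt (key : String) : List Int :=
  let k := PySem.Chars.upper key.toList
  let pos : PySem.Dict Char (List Int) :=
    (PySem.List.enumerate k 0).foldl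
      (fun d p => d.modify p.2 [] (fun l => l ++ [p.1])) PySem.Dict.empty
  (PySem.List.sorted pos.keys (fun c => c) false).foldl (fun acc c => acc ++ pos.getD c []) []

-- ===== PRECONDITION & SPEC =====
def Spec_get_key_order_py (key : String) (out : List Int) : Prop := out = get_key_order_py_alt key
instance (key : String) (out : List Int) : Decidable (Spec_get_key_order_py key out) := by unfold Spec_get_key_order_py; infer_instance

-- ===== CLAIM (what is proved, stated in full; the proofs are below) =====
def Claim_equal_get_key_order_py : Prop := ∀ (key : String), Dom_get_key_order_py key → Spec_get_key_order_py key (get_key_order_py key)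

-- ===== LEMMAS AND PROOFS =====

-- indices (counted from offset n) of the not-yet-consumed occurrences of c
def oidx (c : Char) : List (Option Char) → Int → List Int
  | [], _ => []
  | o :: t, n => if o = some c then n :: oidx c t (n + 1) else oidx c t (n + 1)

-- marks of all occurrences of c consumed
def maskC (c : Char) (l : List (Option Char)) : List (Option Char) :=
  l.map (fun o => if o = some c then none else o)

lemma oidx_of_index? (c : Char) (l : List (Option Char)) (j : Nat)
    (h : PySem.List.index? l (some c) = some j) (n : Int) :
    oidx c l n = (n + (j : Int)) :: oidx c (l.set j none) n := by
  induction l generalizing j n with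
  | nil => simp [PySem.List.index?] at h
  | cons o t ih =>
    by_cases ho : o = some c
    · subst ho
      rw [PySem.List.index?_cons_self] at h
      cases h
      simp [oidx]
    · rw [PySem.List.index?_cons_of_ne t ho] at h
      cases hj : PySem.List.index? t (some c) with
      | none => rw [hj] at h; simp at h
      | some j' =>
        rw [hj] at h; simp at h
        subst h
        simp [oidx, ho, List.set, ih j' hj (n+1)]
        omega

lemma maskC_set (c : Char) (l : List (Option Char)) (j : Nat)
    (h : l[j]? = some (some c)) :
    maskC c (l.set j none) = maskC c l := by
  unfold maskC
  rw [List.map_set]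
  simp
  apply List.ext_getElem?
  intro i
  by_cases hij : i = j
  · subst hij
    rw [List.getElem?_set_self']
    simp [List.getElem?_map, h]
  · rw [List.getElem?_set_ne (by omega)]

lemma oidx_of_not_mem (c : Char) (l : List (Option Char)) (h : some c ∉ l) (n : Int) :
    oidx c l n = [] := by
  induction l generalizing n with
  | nil => simp [oidx]
  | cons o t ih =>
    simp only [List.mem_cons, not_or] at h
    simp [oidx, Ne.symm h.1, ih h.2]

lemma maskC_of_not_mem (c : Char) (l : List (Option Char)) (h : some c ∉ l) :
    maskC c l = l := by
  induction l with
  | nil => rfl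
  | cons o t ih =>
    simp only [List.mem_cons, not_or] at h
    simp [maskC, Ne.symm h.1] at ih ⊢
    exact ih h.2

lemma count_set_none (l : List (Option Char)) (c : Char) (j : Nat) (hj : j < l.length)
    (h : l[j] = some c) : (l.set j none).count (some c) + 1 = l.count (some c) := by
  induction l generalizing j with
  | nil => simp at hj
  | cons o t ih =>
    cases j with
    | zero => simp_all [List.count_cons]
    | succ j' =>
      simp only [List.length_cons] at hj
      simp only [List.getElem_cons_succ] at h
      simp [List.set, List.count_cons, ← ih j' (by omega) h]
      omega

lemma foldl_stepA_replicate (c : Char) :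
    ∀ (cnt : Nat) (l : List (Option Char)) (acc : List Int),
      l.count (some c) = cnt →
      (List.replicate cnt c).foldl stepA (acc, l) = (acc ++ oidx c l 0, maskC c l) := by
  intro cnt
  induction cnt with
  | zero =>
    intro l acc h
    have hnm : some c ∉ l := by
      intro hm; have := List.count_pos_iff.mpr hm; omega
    simp [oidx_of_not_mem c l hnm, maskC_of_not_mem c l hnm]
  | succ k ih =>
    intro l acc h
    have hm : some c ∈ l := by
      by_contra hnm; rw [List.count_eq_zero_of_not_mem hnm] at h; omega
    obtain ⟨j, hj⟩ : ∃ j, PySem.List.index? l (some c) = some j := by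
      cases hidx : PySem.List.index? l (some c) with
      | none => exact absurd hm ((PySem.List.index?_eq_none_iff l (some c)).mp hidx)
      | some j => exact ⟨j, rfl⟩
    obtain ⟨hjlt, hget, -⟩ := PySem.List.getElem_of_index?_eq_some hj
    rw [List.replicate_succ, List.foldl_cons]
    have hj' := hj
    rw [PySem.List.index?_eq_idxOf?] at hj'
    have hstep : stepA (acc, l) c = (acc ++ [(j : Int)], l.set j none) := by
      simp [stepA, hj']
    rw [hstep, ih (l.set j none) (acc ++ [(j : Int)])
      (by have := count_set_none l c j hjlt hget; omega)]
    rw [maskC_set c l j (by rw [List.getElem?_eq_getElem hjlt, hget]),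
      oidx_of_index? c l j hj 0]
    simp

lemma oidx_maskC (c d : Char) (hdc : d ≠ c) (l : List (Option Char)) (n : Int) :
    oidx d (maskC c l) n = oidx d l n := by
  induction l generalizing n with
  | nil => rfl
  | cons o t ih =>
    by_cases h : o = some c
    · subst h
      simp [maskC, oidx, (by simp [hdc.symm] : some c ≠ some d)] at ih ⊢
      exact ih _
    · simp [maskC, oidx, h] at ih ⊢
      by_cases hd : o = some d <;> simp [hd, ih]

lemma count_flatMap_replicate (k : Char → Nat) (x : Char) :
    ∀ (cs : List Char), cs.Nodup →
      (cs.flatMap (fun c => List.replicate (k c) c)).count x = if x ∈ cs then k x else 0 := by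
  intro cs
  induction cs with
  | nil => simp
  | cons c t ih =>
    intro hnd
    rw [List.nodup_cons] at hnd
    rw [List.flatMap_cons, List.count_append, ih hnd.2, List.count_replicate]
    by_cases hx : x = c
    · subst hx; simp [hnd.1]
    · simp [hx, Ne.symm hx]

lemma pairwise_le_flatMap_replicate (k : Char → Nat) :
    ∀ (cs : List Char), cs.Pairwise (· < ·) →
      (cs.flatMap (fun c => List.replicate (k c) c)).Pairwise (· ≤ ·) := by
  intro cs
  induction cs with
  | nil => simp
  | cons c t ih =>
    intro hp
    rw [List.pairwise_cons] at hp
    rw [List.flatMap_cons, List.pairwise_append]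
    refine ⟨List.pairwise_replicate.mpr (Or.inr le_rfl), ih hp.2, ?_⟩
    intro a ha b hb
    rw [List.eq_of_mem_replicate ha]
    obtain ⟨d, hd, hbd⟩ := List.mem_flatMap.mp hb
    rw [List.eq_of_mem_replicate hbd]
    exact le_of_lt (hp.1 d hd)

lemma sorted_decomp (u : List Char) :
    PySem.List.sorted u (fun c => c) false =
      (PySem.List.sorted (PySem.Set.ofList u) (fun c => c) false).flatMap
        (fun c => List.replicate (u.count c) c) := by
  have hnd : (PySem.List.sorted (PySem.Set.ofList u) (fun c => c) false).Nodup :=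
    ((PySem.List.sorted_perm (PySem.Set.ofList u) (fun c => c) false).nodup_iff).mpr
      (PySem.Set.nodup_ofList u)
  have hlt : (PySem.List.sorted (PySem.Set.ofList u) (fun c => c) false).Pairwise (· < ·) := by
    have hle := PySem.List.sorted_pairwise (PySem.Set.ofList u) (fun c => c)
    exact (hle.and hnd).imp (fun h => lt_of_le_of_ne h.1 h.2)
  apply PySem.List.sorted_id_eq_of_perm_of_pairwise
  · rw [List.perm_iff_count]
    intro x
    rw [count_flatMap_replicate _ _ _ hnd]
    by_cases hx : x ∈ u
    · simp [PySem.List.mem_sorted, PySem.Set.mem_ofList, hx]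
    · simp [PySem.List.mem_sorted, PySem.Set.mem_ofList, hx,
        List.count_eq_zero_of_not_mem hx]
  · exact pairwise_le_flatMap_replicate _ _ hlt

lemma length_oidx (c : Char) (l : List (Option Char)) (n : Int) :
    (oidx c l n).length = l.count (some c) := by
  induction l generalizing n with
  | nil => simp [oidx]
  | cons o t ih =>
    by_cases h : o = some c <;> simp [oidx, h, ih]

lemma count_map_some (u : List Char) (c : Char) :
    (u.map some).count (some c) = u.count c := by
  induction u with
  | nil => rfl
  | cons x t ih => by_cases h : x = c <;> simp [h, ih]

lemma foldl_groups (u : List Char) :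
    ∀ (cs : List Char) (m : List (Option Char)) (acc : List Int),
      cs.Nodup →
      (∀ c ∈ cs, oidx c m 0 = oidx c (u.map some) 0) →
      ((cs.flatMap (fun c => List.replicate (u.count c) c)).foldl stepA (acc, m)).1 =
        acc ++ cs.flatMap (fun c => oidx c (u.map some) 0) := by
  intro cs
  induction cs with
  | nil => simp
  | cons c t ih =>
    intro m acc hnd hinv
    rw [List.nodup_cons] at hnd
    have hcnt : m.count (some c) = u.count c := by
      rw [← length_oidx c m 0, hinv c (by simp), length_oidx, count_map_some]
    rw [List.flatMap_cons, List.foldl_append, ← hcnt,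
      foldl_stepA_replicate c _ m acc rfl]
    rw [List.flatMap_cons, hinv c (by simp), ← List.append_assoc]
    apply ih (maskC c m) _ hnd.2
    intro d hd
    rw [oidx_maskC c d (fun e => hnd.1 (e ▸ hd)), hinv d (by simp [hd])]

lemma A_char (u : List Char) :
    ((PySem.List.sorted u (fun c => c) false).foldl stepA ([], u.map some)).1 =
      (PySem.List.sorted (PySem.Set.ofList u) (fun c => c) false).flatMap
        (fun c => oidx c (u.map some) 0) := by
  rw [sorted_decomp u]
  have hnd : (PySem.List.sorted (PySem.Set.ofList u) (fun c => c) false).Nodup :=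
    ((PySem.List.sorted_perm (PySem.Set.ofList u) (fun c => c) false).nodup_iff).mpr
      (PySem.Set.nodup_ofList u)
  simpa using foldl_groups u _ (u.map some) [] hnd (fun _ _ => rfl)

lemma enumerate_filter_map (u : List Char) (c : Char) (s : Int) :
    ((PySem.List.enumerate u s).filter (fun p => p.2 == c)).map (fun p => p.1) =
      oidx c (u.map some) s := by
  induction u generalizing s with
  | nil => simp [PySem.List.enumerate, oidx]
  | cons x t ih =>
    rw [PySem.List.enumerate_cons]
    by_cases h : x = c
    · subst h; simp [oidx, ih]
    · simp [oidx, h, ih]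

lemma B_char (u : List Char) :
    (PySem.List.sorted ((PySem.List.enumerate u 0).foldl
        (fun d p => d.modify p.2 [] (fun l => l ++ [p.1])) PySem.Dict.empty).keys (fun c => c) false).foldl
      (fun acc c => acc ++ ((PySem.List.enumerate u 0).foldl
        (fun d p => d.modify p.2 [] (fun l => l ++ [p.1])) PySem.Dict.empty).getD c []) [] =
      (PySem.List.sorted (PySem.Set.ofList u) (fun c => c) false).flatMap
        (fun c => oidx c (u.map some) 0) := by
  have hfold : (PySem.List.enumerate u 0).foldl
      (fun d p => d.modify p.2 [] (fun l => l ++ [p.1])) PySem.Dict.empty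
      = ((PySem.List.enumerate u 0).map (fun p => (p.2, p.1))).foldl
        (fun d p => d.modify p.1 [] (fun l => l ++ [p.2])) PySem.Dict.empty := by
    rw [List.foldl_map]
  have hkeys : ((PySem.List.enumerate u 0).foldl
      (fun d p => d.modify p.2 [] (fun l => l ++ [p.1])) PySem.Dict.empty).keys
      = PySem.Set.ofList u := by
    rw [PySem.Dict.keys_foldl_modify_key (PySem.List.enumerate u 0) (fun p => p.2) []
      (fun _ p => fun l => l ++ [p.1]) PySem.Dict.empty]
    rw [PySem.List.map_snd_enumerate]
    rfl
  have hgetD : ∀ c, ((PySem.List.enumerate u 0).foldl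
      (fun d p => d.modify p.2 [] (fun l => l ++ [p.1])) PySem.Dict.empty).getD c []
      = oidx c (u.map some) 0 := by
    intro c
    rw [hfold, PySem.Dict.getD_foldl_modify_append]
    rw [List.filter_map, List.map_map, ← enumerate_filter_map u c 0]
    congr 1
  rw [hkeys, PySem.List.foldl_append_eq_flatMap]
  simp only [List.nil_append]
  exact List.flatMap_congr (fun c _ => hgetD c)

-- ===== VERDICT (by name: the statement is the Claim_ definition above) =====
theorem get_key_order_py_spec : Claim_equal_get_key_order_py := by
  intro key _
  unfold Spec_get_key_order_py
  simp only [get_key_order_py, get_key_order_py_alt]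
  rw [A_char (PySem.Chars.upper key.toList)]
  exact (B_char (PySem.Chars.upper key.toList)).symm
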